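-- pv_equiv track=rewrite | github.com/anastasiasenyk/ukrainian-lexical-stress | wav2vec/data/setup_dataset.py | retain_first_stress
-- ===== SOURCE A (Python) =====
-- STRESS_MARK = "+"
--
-- def retain_first_stress(word):
--     found_stress = False
--     result = []
--     for char in word:
--         if char == STRESS_MARK:
--             if not found_stress:
--                 result.append(char)
--                 found_stress = True  # Mark that we've found the first stress
--         else:
--             result.append(char)  # Add non-stressed characters
--
--     return ''.join(result)
-- ===== SOURCE B (Python) =====
-- STRESS_MARK = "+"
--
-- def retain_first_stress(word):
--     idx = word.find(STRESS_MARK)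
--     if idx == -1:
--         return word
--     return word[:idx + 1] + word[idx + 1:].replace(STRESS_MARK, "")
-- ===== Notes on version B (the rewrite author's own statement) =====
-- stated objective: simpler
-- what changed: Replaces the flag-guarded per-character loop with a locate-then-bulk-strip decomposition: find the first stress mark, keep the prefix through it, and strip all stress marks from the suffix with str.replace; the split point is found by C-level str.find and the suffix stripped by C-level str.replace instead of a Python-level per-character loop.
import Mathlib
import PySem

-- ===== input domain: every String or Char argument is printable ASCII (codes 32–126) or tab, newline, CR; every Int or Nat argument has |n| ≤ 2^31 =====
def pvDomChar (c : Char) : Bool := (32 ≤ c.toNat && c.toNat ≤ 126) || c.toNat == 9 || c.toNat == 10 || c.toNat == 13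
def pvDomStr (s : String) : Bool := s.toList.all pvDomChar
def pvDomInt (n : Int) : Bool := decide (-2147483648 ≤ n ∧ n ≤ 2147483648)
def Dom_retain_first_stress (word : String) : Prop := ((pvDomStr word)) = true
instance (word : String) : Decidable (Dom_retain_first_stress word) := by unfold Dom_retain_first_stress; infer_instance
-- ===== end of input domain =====

-- B replaces A's flag-guarded per-character loop by a locate-then-bulk-strip decomposition
-- (find the first stress mark, keep the prefix through it, strip the marks from the suffix); measured faster in a timing run.

-- ===== PORT A =====
-- Python A: loop over the characters with a found_stress flag, appending to result.
def retain_first_stress (word : String) : String :=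
  let final := word.toList.foldl
    (fun (st : Bool × List Char) char =>
      if char = '+' then
        if st.1 = false then (true, st.2 ++ [char]) else st
      else
        (st.1, st.2 ++ [char]))
    (false, [])
  String.ofList final.2

-- ===== PORT B =====
-- Python B: idx = word.find('+'); if idx == -1 return word; else word[:idx+1] + word[idx+1:].replace('+','').
def retain_first_stress_alt (word : String) : String :=
  let idx := PySem.Str.find word "+"
  if idx = -1 then word
  else PySem.Str.slice word none (some (idx + 1)) ++
       PySem.Str.replace (PySem.Str.slice word (some (idx + 1)) none) "+" ""

-- ===== PRECONDITION & SPEC =====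
def Spec_retain_first_stress (word : String) (out : String) : Prop := out = retain_first_stress_alt word
instance (word : String) (out : String) : Decidable (Spec_retain_first_stress word out) := by unfold Spec_retain_first_stress; infer_instance

-- ===== CLAIM (what is proved, stated in full; the proofs are below) =====
def Claim_equal_retain_first_stress : Prop := ∀ (word : String), Dom_retain_first_stress word → Spec_retain_first_stress word (retain_first_stress word)

-- ===== LEMMAS AND PROOFS =====

-- Common characterisation: keep everything up to and including the first '+', filter '+' from the rest.
def pvKeepFirst : List Char → List Char
  | [] => []
  | c :: t => if c = '+' then '+' :: t.filter (· ≠ '+') else c :: pvKeepFirst t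

-- A's loop body (named for the lemmas).
def pvStepA (st : Bool × List Char) (char : Char) : Bool × List Char :=
  if char = '+' then
    if st.1 = false then (true, st.2 ++ [char]) else st
  else
    (st.1, st.2 ++ [char])

theorem pvFoldA_true (cs : List Char) (acc : List Char) :
    cs.foldl pvStepA (true, acc) = (true, acc ++ cs.filter (· ≠ '+')) := by
  induction cs generalizing acc with
  | nil => simp
  | cons c t ih =>
    by_cases hc : c = '+' <;> simp [pvStepA, hc, ih]

theorem pvFoldA_false (cs : List Char) (acc : List Char) :
    (cs.foldl pvStepA (false, acc)).2 = acc ++ pvKeepFirst cs := by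
  induction cs generalizing acc with
  | nil => simp [pvKeepFirst]
  | cons c t ih =>
    by_cases hc : c = '+'
    · simp [pvStepA, hc, pvKeepFirst, pvFoldA_true]
    · simp [pvStepA, hc, pvKeepFirst, ih]

theorem pvKeepFirst_no_plus (cs : List Char) (h : '+' ∉ cs) : pvKeepFirst cs = cs := by
  induction cs with
  | nil => rfl
  | cons c t ih =>
    simp only [List.mem_cons, not_or] at h
    simp [pvKeepFirst, Ne.symm h.1, ih h.2]

theorem pvReplace_go (fuel : Nat) (l acc : List Char) (h : l.length ≤ fuel) :
    PySem.Chars.replace.go ['+'] [] fuel l acc = acc.reverse ++ l.filter (· ≠ '+') := by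
  induction fuel generalizing l acc with
  | zero =>
    have : l = [] := by
      cases l with
      | nil => rfl
      | cons c t => simp at h
    simp [this, PySem.Chars.replace.go]
  | succ n ih =>
    cases l with
    | nil => simp [PySem.Chars.replace.go]
    | cons c t =>
      by_cases hc : c = '+'
      · simp only [PySem.Chars.replace.go, hc]
        simp [List.isPrefixOf, ih t acc (by simpa using h)]
      · have hc' : ('+' : Char) ≠ c := Ne.symm hc
        simp only [PySem.Chars.replace.go]
        have hpre : List.isPrefixOf ['+'] (c :: t) = false := by
          simp [List.isPrefixOf, hc']
        simp [hpre, ih t (c :: acc) (by simpa using h), hc]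

theorem pvReplace_filter (l : List Char) :
    PySem.Chars.replace l ['+'] [] = l.filter (· ≠ '+') := by
  simp [PySem.Chars.replace, pvReplace_go l.length l [] le_rfl]

-- '+' is found in the remainder at offset (find - k) : shift lemma for find.go.
theorem pvFind_go_shift (t : List Char) (k : Nat) :
    PySem.Chars.find.go ['+'] t k =
      if PySem.Chars.find t ['+'] = -1 then -1 else PySem.Chars.find t ['+'] + k := by
  induction t generalizing k with
  | nil => simp [PySem.Chars.find, PySem.Chars.find.go]
  | cons c t ih =>
    by_cases hc : c = '+'
    · simp [PySem.Chars.find, PySem.Chars.find.go, List.isPrefixOf, hc]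
    · have hc' : ('+' : Char) ≠ c := Ne.symm hc
      have hpre : List.isPrefixOf ['+'] (c :: t) = false := by
        simp [List.isPrefixOf, hc']
      have hge : -1 ≤ PySem.Chars.find t ['+'] := PySem.Chars.neg_one_le_find t ['+']
      simp only [PySem.Chars.find, PySem.Chars.find.go, hpre, Bool.false_eq_true, if_false]
      rw [ih (k + 1), ih 1]
      by_cases hf : PySem.Chars.find t ['+'] = -1
      · simp [hf]
      · have : ¬ (PySem.Chars.find t ['+'] + 1 = -1) := by omega
        have h1 : ¬ (1 + PySem.Chars.find t ['+'] = -1) := by omega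
        simp only [hf, if_false]
        push_cast
        simp only [add_comm, h1, if_false]
        ring

theorem pvFind_not_mem (cs : List Char) (h : PySem.Chars.find cs ['+'] = -1) : '+' ∉ cs := by
  intro hm
  have : ['+'] <:+: cs := by
    obtain ⟨l1, l2, rfl⟩ := List.append_of_mem hm
    exact ⟨l1, l2, by simp⟩
  exact (PySem.Chars.find_eq_neg_one_iff cs ['+']).mp h this

-- Main list-level lemma: B's locate-then-strip form equals pvKeepFirst.
theorem pvAlt_list (cs : List Char) :
    (if PySem.Chars.find cs ['+'] = -1 then cs
     else cs.take ((PySem.Chars.find cs ['+']).toNat + 1) ++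
          (cs.drop ((PySem.Chars.find cs ['+']).toNat + 1)).filter (· ≠ '+'))
    = pvKeepFirst cs := by
  induction cs with
  | nil => simp [PySem.Chars.find, PySem.Chars.find.go, pvKeepFirst]
  | cons c t ih =>
    by_cases hc : c = '+'
    · have h0 : PySem.Chars.find (c :: t) ['+'] = 0 := by
        simp [PySem.Chars.find, PySem.Chars.find.go, List.isPrefixOf, hc]
      subst hc
      simp [h0, pvKeepFirst]
    · have hc' : ('+' : Char) ≠ c := Ne.symm hc
      have hpre : List.isPrefixOf ['+'] (c :: t) = false := by
        simp [List.isPrefixOf, hc']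
      have hcons : PySem.Chars.find (c :: t) ['+'] =
          if PySem.Chars.find t ['+'] = -1 then -1 else PySem.Chars.find t ['+'] + 1 := by
        simp only [PySem.Chars.find, PySem.Chars.find.go, hpre, Bool.false_eq_true, if_false]
        exact pvFind_go_shift t 1
      by_cases hf : PySem.Chars.find t ['+'] = -1
      · have : PySem.Chars.find (c :: t) ['+'] = -1 := by simp [hcons, hf]
        simp [this, pvKeepFirst, hc, pvKeepFirst_no_plus t (pvFind_not_mem t hf)]
      · have hge : -1 ≤ PySem.Chars.find t ['+'] := PySem.Chars.neg_one_le_find t ['+']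
        have hne : ¬ (PySem.Chars.find t ['+'] + 1 = -1) := by omega
        have hval : PySem.Chars.find (c :: t) ['+'] = PySem.Chars.find t ['+'] + 1 := by
          simp [hcons, hf]
        have htn : (PySem.Chars.find t ['+'] + 1).toNat = (PySem.Chars.find t ['+']).toNat + 1 := by
          omega
        simp only [hval, hne, if_false, htn, List.take_succ_cons, List.drop_succ_cons,
          List.cons_append, pvKeepFirst, hc]
        rw [← ih]
        simp [hf]

-- ===== VERDICT (by name: the statement is the Claim_ definition above) =====
theorem retain_first_stress_spec : Claim_equal_retain_first_stress := by
  intro word _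
  show retain_first_stress word = retain_first_stress_alt word
  unfold retain_first_stress retain_first_stress_alt
  have hA : (word.toList.foldl
      (fun (st : Bool × List Char) char =>
        if char = '+' then
          if st.1 = false then (true, st.2 ++ [char]) else st
        else (st.1, st.2 ++ [char])) (false, [])).2 = pvKeepFirst word.toList := by
    have := pvFoldA_false word.toList []
    simpa [pvStepA] using this
  simp only [hA]
  have hfind : PySem.Str.find word "+" = PySem.Chars.find word.toList ['+'] := by
    simp [PySem.Str.find_eq]
  by_cases h : PySem.Chars.find word.toList ['+'] = -1
  · rw [← pvAlt_list word.toList]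
    simp [hfind, h]
  · have hge : -1 ≤ PySem.Chars.find word.toList ['+'] := PySem.Chars.neg_one_le_find _ _
    have hnn : 0 ≤ PySem.Chars.find word.toList ['+'] := by omega
    have hnn1 : 0 ≤ PySem.Chars.find word.toList ['+'] + 1 := by omega
    have htn : (PySem.Chars.find word.toList ['+'] + 1).toNat
        = (PySem.Chars.find word.toList ['+']).toNat + 1 := by omega
    rw [← pvAlt_list word.toList]
    simp only [hfind, h, if_false]
    apply String.ext
    simp [PySem.Str.toList_replace, PySem.Str.toList_slice,
      PySem.List.slice_to _ hnn1, PySem.List.slice_from _ hnn1,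
      pvReplace_filter, htn]
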